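-- pv_equiv track=rewrite | github.com/Diligent0924/Programmers | 2단계!/디펜스게임.py | solution
-- ===== SOURCE A (Python) =====
-- import heapq
--
-- def solution(n, k, enemy): # n : 병사의 수 / k : 무적권 / enemy : list형태의 적의 수
--     result = 0
--     heap = []
--     for e in enemy:
--         heapq.heappush(heap, -e)
--         n -= e
--         if n < 0: # visited는 음수로 들어간다.
--             if k > 0:
--                 k -= 1
--                 n -= heapq.heappop(heap)
--             else:
--                 break
--         result += 1
--
--     return result
-- ===== SOURCE B (Python) =====
-- def solution(n, k, enemy):
--     # Same greedy decisions, but instead of a negated binary heap we keep the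
--     # uncovered round costs in an ascending sorted list (hand-rolled ordered
--     # insert, scanning from the end); the refund is the last element, and we
--     # return the round index directly on failure instead of counting with break.
--     seen = []  # costs of rounds not yet covered by a token, ascending
--     for i, e in enumerate(enemy):
--         j = len(seen)
--         while j > 0 and seen[j - 1] > e:
--             j -= 1
--         seen.insert(j, e)
--         n -= e
--         if n < 0:
--             if k <= 0:
--                 return i
--             k -= 1
--             n += seen.pop()
--     return len(enemy)
-- ===== Notes on version B (the rewrite author's own statement) =====
-- stated objective: alternative
-- what changed: Replaces the heapq negated min-heap with a hand-rolled ascending ordered-insert list whose last element is the refund, and returns the round index on failure instead of maintaining a result counter with break.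
import Mathlib
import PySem

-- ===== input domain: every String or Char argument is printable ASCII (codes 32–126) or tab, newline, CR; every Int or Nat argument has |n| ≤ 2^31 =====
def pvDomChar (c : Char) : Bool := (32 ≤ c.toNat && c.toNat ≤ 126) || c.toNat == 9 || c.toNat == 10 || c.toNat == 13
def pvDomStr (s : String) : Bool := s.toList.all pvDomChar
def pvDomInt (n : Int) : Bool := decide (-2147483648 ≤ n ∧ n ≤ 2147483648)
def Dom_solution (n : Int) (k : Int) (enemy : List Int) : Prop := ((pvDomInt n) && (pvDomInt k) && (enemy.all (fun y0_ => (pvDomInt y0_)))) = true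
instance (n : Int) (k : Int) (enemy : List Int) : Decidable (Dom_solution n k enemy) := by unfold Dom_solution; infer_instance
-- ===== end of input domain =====

-- B replaces A's negated binary heap by an ascending ordered-insert list (refund = last element,
-- early return of the round index instead of a counter with break); objective: alternative, same greedy result.

-- ===== PORT A =====
-- heapq is modeled by its contract on Int: the heap is the multiset of pushed-and-not-popped
-- entries, heappush adds an entry, heappop removes and returns a minimal entry (entries are
-- plain Ints, so which equal minimal entry is removed cannot affect any value A computes).
def heapPop (h : List Int) : Int × List Int :=
  let m := h.min?.getD 0   -- getD is never used: A pops only right after a push, so h ≠ []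
  (m, h.erase m)

-- the for-loop of A as structural recursion over the remaining enemies;
-- state: current n, remaining k, heap contents; returns the rounds survived from here on.
def solutionGo : List Int → Int → Int → List Int → Int
  | [], _n, _k, _heap => 0
  | e :: rest, n, k, heap =>
    let heap' := (-e) :: heap            -- heapq.heappush(heap, -e)
    let n' := n - e
    if n' < 0 then
      if k > 0 then
        let p := heapPop heap'           -- n -= heapq.heappop(heap)
        1 + solutionGo rest (n' - p.1) (k - 1) p.2
      else 0                             -- break: result stops here
    else 1 + solutionGo rest n' k heap'

def solution (n : Int) (k : Int) (enemy : List Int) : Int :=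
  solutionGo enemy n k []

-- ===== PORT B =====
-- Source B's ordered insert scans the ascending list `seen` from its right end and inserts
-- after the last element ≤ e; on the sorted lists (the only lists Source B ever builds) that
-- is the position before the first element > e, which this front recursion computes.
def insertAsc (e : Int) : List Int → List Int
  | [] => [e]
  | x :: xs => if x > e then e :: x :: xs else x :: insertAsc e xs

-- the for-loop of Source B; `i` is the enumerate index, `seen` the ascending list of uncovered costs
def solutionAltGo : List Int → Int → Int → Int → List Int → Int
  | [], _i, _n, _k, _seen => 0            -- loop ended without returning early
  | e :: rest, i, n, k, seen =>
    let seen' := insertAsc e seen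
    let n' := n - e
    if n' < 0 then
      if k ≤ 0 then 0                     -- return i: from round i on, zero more rounds
      else
        let big := seen'.getLast?.getD 0  -- seen.pop(): getD unused, seen' is never []
        1 + solutionAltGo rest (i + 1) (n' + big) (k - 1) seen'.dropLast
    else 1 + solutionAltGo rest (i + 1) n' k seen'

def solution_alt (n : Int) (k : Int) (enemy : List Int) : Int :=
  solutionAltGo enemy 0 n k []

-- ===== PRECONDITION & SPEC =====
def Spec_solution (n : Int) (k : Int) (enemy : List Int) (out : Int) : Prop := out = solution_alt n k enemy
instance (n : Int) (k : Int) (enemy : List Int) (out : Int) : Decidable (Spec_solution n k enemy out) := by unfold Spec_solution; infer_instance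

-- ===== CLAIM (what is proved, stated in full; the proofs are below) =====
def Claim_equal_solution : Prop := ∀ (n : Int) (k : Int) (enemy : List Int), Dom_solution n k enemy → Spec_solution n k enemy (solution n k enemy)

-- ===== LEMMAS AND PROOFS =====

lemma insertAsc_perm (e : Int) (l : List Int) : (insertAsc e l).Perm (e :: l) := by
  induction l with
  | nil => simp [insertAsc]
  | cons x xs ih =>
    simp only [insertAsc]
    split
    · exact List.Perm.refl _
    · exact (ih.cons x).trans (List.Perm.swap e x xs)

lemma insertAsc_ne_nil (e : Int) (l : List Int) : insertAsc e l ≠ [] := by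
  cases l with
  | nil => simp [insertAsc]
  | cons x xs => simp only [insertAsc]; split <;> simp

lemma insertAsc_sorted (e : Int) (l : List Int)
    (h : l.Pairwise (fun a b => a ≤ b)) :
    (insertAsc e l).Pairwise (fun a b => a ≤ b) := by
  induction l with
  | nil => simp [insertAsc]
  | cons x xs ih =>
    rcases List.pairwise_cons.mp h with ⟨hx, hxs⟩
    simp only [insertAsc]
    split
    · rename_i hgt
      refine List.pairwise_cons.mpr ⟨?_, h⟩
      intro b hb
      rcases List.mem_cons.mp hb with rfl | hb'
      · omega
      · exact le_trans (by omega) (hx _ hb')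
    · rename_i hle
      refine List.pairwise_cons.mpr ⟨?_, ih hxs⟩
      intro b hb
      rcases List.mem_cons.mp ((insertAsc_perm e xs).mem_iff.mp hb) with rfl | hb'
      · omega
      · exact hx _ hb'

lemma sorted_getLast_max {l : List Int} (hne : l ≠ [])
    (h : l.Pairwise (fun a b => a ≤ b)) :
    ∀ y ∈ l, y ≤ l.getLast hne := by
  induction l with
  | nil => exact absurd rfl hne
  | cons x xs ih =>
    intro y hy
    cases xs with
    | nil =>
      rcases List.mem_cons.mp hy with rfl | hy'
      · simp [List.getLast]
      · simp at hy'
    | cons z zs =>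
      rw [List.getLast_cons (by simp)]
      rcases List.pairwise_cons.mp h with ⟨hx, hxs⟩
      rcases List.mem_cons.mp hy with rfl | hy'
      · exact le_trans (hx _ (List.getLast_mem _)) (le_refl _)
      · exact ih (by simp) hxs y hy'

-- min of a nonempty list via foldl: membership and lower-bound facts
lemma foldl_min_spec (xs : List Int) : ∀ a : Int,
    (xs.foldl min a ≤ a ∧ ∀ y ∈ xs, xs.foldl min a ≤ y) ∧
    (xs.foldl min a = a ∨ xs.foldl min a ∈ xs) := by
  induction xs with
  | nil => intro a; simp
  | cons x xs ih =>
    intro a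
    simp only [List.foldl_cons]
    obtain ⟨⟨h1, h2⟩, h3⟩ := ih (min a x)
    refine ⟨⟨le_trans h1 (min_le_left a x), ?_⟩, ?_⟩
    · intro y hy
      rcases List.mem_cons.mp hy with rfl | hy'
      · exact le_trans h1 (min_le_right a y)
      · exact h2 _ hy'
    · rcases h3 with h | h
      · rcases min_choice a x with hax | hax
        · exact Or.inl (h.trans hax)
        · exact Or.inr (by rw [h, hax]; exact List.mem_cons_self)
      · exact Or.inr (List.mem_cons_of_mem x h)

lemma min?_spec {x : Int} {xs : List Int} :
    ∃ m, (x :: xs).min? = some m ∧ m ∈ x :: xs ∧ ∀ y ∈ x :: xs, m ≤ y := by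
  refine ⟨xs.foldl min x, by simp [List.min?], ?_, ?_⟩
  · rcases (foldl_min_spec xs x).2 with h | h
    · rw [h]; exact List.mem_cons_self
    · exact List.mem_cons_of_mem x h
  · intro y hy
    rcases List.mem_cons.mp hy with rfl | hy'
    · exact (foldl_min_spec xs y).1.1
    · exact (foldl_min_spec xs x).1.2 _ hy'

-- the main simulation invariant: if `seen` is ascending and its negations are a
-- permutation of the heap contents, both loops return the same count.
lemma go_eq (rest : List Int) : ∀ (i n k : Int) (heap seen : List Int),
    seen.Pairwise (fun a b => a ≤ b) →
    (seen.map (fun x => -x)).Perm heap →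
    solutionGo rest n k heap = solutionAltGo rest i n k seen := by
  induction rest with
  | nil => intro i n k heap seen _ _; rfl
  | cons e rest ih =>
    intro i n k heap seen hs hp
    have hs' : (insertAsc e seen).Pairwise (fun a b => a ≤ b) := insertAsc_sorted e seen hs
    have hp' : ((insertAsc e seen).map (fun x => -x)).Perm ((-e) :: heap) :=
      ((insertAsc_perm e seen).map _).trans (hp.cons (-e))
    have hne : insertAsc e seen ≠ [] := insertAsc_ne_nil e seen
    simp only [solutionGo, solutionAltGo]
    split
    · rename_i hneg
      by_cases hk : k > 0
      · rw [if_pos hk, if_neg (by omega)]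
        set L := insertAsc e seen with hL
        set big := L.getLast hne with hbig
        -- getLast? agrees with getLast on the nonempty L
        have hgl : L.getLast?.getD 0 = big := by
          rw [List.getLast?_eq_some_getLast hne]; rfl
        -- L is a permutation of big :: L.dropLast
        have hLperm : L.Perm (big :: L.dropLast) := by
          conv_lhs => rw [← List.dropLast_append_getLast hne]
          exact List.perm_append_singleton _ _
        -- the popped minimum of the heap is -big
        rcases @min?_spec (-e) heap with ⟨m, hm, hmem, hle⟩
        have hbigmem : -big ∈ (-e) :: heap :=
          hp'.mem_iff.mp (List.mem_map.mpr ⟨big, List.getLast_mem hne, rfl⟩)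
        have hbigle : ∀ y ∈ (-e) :: heap, -big ≤ y := by
          intro y hy
          rcases List.mem_map.mp (hp'.mem_iff.mpr hy) with ⟨z, hz, rfl⟩
          have := sorted_getLast_max hne hs' z hz
          omega
        have hmb : m = -big := le_antisymm (hle _ hbigmem) (hbigle _ hmem)
        have hpop : heapPop ((-e) :: heap) = (m, ((-e) :: heap).erase m) := by
          simp [heapPop, hm]
        rw [hpop, hgl]
        show 1 + solutionGo rest (n - e - m) (k - 1) (((-e) :: heap).erase m) =
             1 + solutionAltGo rest (i + 1) (n - e + big) (k - 1) L.dropLast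
        subst hmb
        have herase : ((L.dropLast).map (fun x => -x)).Perm (((-e) :: heap).erase (-big)) := by
          have h2 := List.Perm.erase (-big) ((hLperm.map (fun x => -x)).symm.trans hp')
          simpa using h2
        have harith : n - e - -big = n - e + big := by ring
        rw [harith, ih (i + 1) (n - e + big) (k - 1) (((-e) :: heap).erase (-big)) L.dropLast
          (List.Pairwise.sublist (List.dropLast_sublist L) hs') herase]
      · rw [if_neg hk, if_pos (by omega)]
    · exact congrArg (1 + ·) (ih (i + 1) (n - e) k ((-e) :: heap) (insertAsc e seen) hs' hp')

-- ===== VERDICT (by name: the statement is the Claim_ definition above) =====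
theorem solution_spec : Claim_equal_solution := by
  intro n k enemy _
  unfold Spec_solution solution solution_alt
  exact go_eq enemy 0 n k [] [] (by simp) (by simp)
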